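-- pv_equiv track=rewrite | github.com/icyDaybreak/akira-s-study-record | RE/PangbaiTai_La_Ji（来源：NewStarCTF2024 week5）/opcode.py | disasm
-- ===== SOURCE A (Python) =====
-- def disasm(code):
--     pc = 0
--     out = []
--     while pc < len(code):
--         op = code[pc]
--
--         if op == 0x01:   # LOAD_IMM
--             r = code[pc+1]
--             imm = code[pc+2]
--             out.append(f"{pc:02X}: LOAD_IMM R{r}, {imm}")
--             pc += 3
--
--         elif op == 0x02: # LOAD_ADDR
--             r = code[pc+1]
--             imm = code[pc+2]
--             base = code[pc+3]
--             out.append(f"{pc:02X}: LOAD_ADDR R{r}, {imm}, R{base}")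
--             pc += 4
--
--         elif op == 0x03: # STORE_ADDR
--             off = code[pc+1]
--             base = code[pc+2]
--             src  = code[pc+3]
--             out.append(f"{pc:02X}: STORE_ADDR {off}, R{base}, R{src}")
--             pc += 4
--
--         elif op == 0x04: # ADD
--             r1 = code[pc+1]
--             r2 = code[pc+2]
--             rd = code[pc+3]
--             out.append(f"{pc:02X}: ADD R{r1}, R{r2}, R{rd}")
--             pc += 4
--
--         elif op == 0x05: # MOD
--             r = code[pc+1]
--             imm = code[pc+2]
--             rd = code[pc+3]
--             out.append(f"{pc:02X}: MOD R{r}, {imm}, R{rd}")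
--             pc += 4
--
--         elif op == 0x06: # XOR
--             r1 = code[pc+1]
--             r2 = code[pc+2]
--             rd = code[pc+3]
--             out.append(f"{pc:02X}: XOR R{r1}, R{r2}, R{rd}")
--             pc += 4
--
--         elif op == 0x07: # INC
--             r = code[pc+1]
--             out.append(f"{pc:02X}: INC R{r}")
--             pc += 2
--
--         elif op == 0x08: # CMP
--             r = code[pc+1]
--             imm = code[pc+2]
--             out.append(f"{pc:02X}: CMP R{r}, {imm}")
--             pc += 3
--
--         elif op == 0x09: # JMP
--             imm = code[pc+1]
--             out.append(f"{pc:02X}: JMP {imm}")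
--             pc += 2
--
--         elif op == 0x0A: # JNZ
--             imm = code[pc+1]
--             out.append(f"{pc:02X}: JNZ {imm}")
--             pc += 2
--
--         elif op == 0x0B: # LOAD_IND
--             rd = code[pc+1]
--             rs = code[pc+2]
--             out.append(f"{pc:02X}: LOAD_IND R{rd}, R{rs}")
--             pc += 3
--
--         else:
--             out.append(f"{pc:02X}: DB {op}")
--             pc += 1
--
--     return out
-- ===== SOURCE B (Python) =====
-- # Two-stage disassembly: decode to an (pc, op, operands) IR first, then format each
-- # record from a single opcode->(mnemonic, operand-mode string) table with a join.
-- INFO = {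
--     0x01: ("LOAD_IMM", "RI"),
--     0x02: ("LOAD_ADDR", "RIR"),
--     0x03: ("STORE_ADDR", "IRR"),
--     0x04: ("ADD", "RRR"),
--     0x05: ("MOD", "RIR"),
--     0x06: ("XOR", "RRR"),
--     0x07: ("INC", "R"),
--     0x08: ("CMP", "RI"),
--     0x09: ("JMP", "I"),
--     0x0A: ("JNZ", "I"),
--     0x0B: ("LOAD_IND", "RR"),
-- }
--
-- def _decode(code):
--     recs, pc = [], 0
--     while pc < len(code):
--         op = code[pc]
--         k = len(INFO[op][1]) if op in INFO else 0
--         recs.append((pc, op, [code[pc + 1 + j] for j in range(k)]))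
--         pc += 1 + k
--     return recs
--
-- def _fmt(rec):
--     pc, op, args = rec
--     if op in INFO:
--         name, modes = INFO[op]
--         return f"{pc:02X}: {name} " + ", ".join(
--             ("R" if m == "R" else "") + str(a) for m, a in zip(modes, args))
--     return f"{pc:02X}: DB {op}"
--
-- def disasm(code):
--     return [_fmt(rec) for rec in _decode(code)]
-- ===== Notes on version B (the rewrite author's own statement) =====
-- stated objective: alternative
-- what changed: Replaces A's single pass with 12 inline formatting branches by a two-stage pipeline: a decode pass producing an (pc, opcode, operands) IR driven by one opcode->(mnemonic, operand-mode string) table, then a separate formatting pass that renders each record with a ', '.join over mode-tagged operands.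
import Mathlib
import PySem

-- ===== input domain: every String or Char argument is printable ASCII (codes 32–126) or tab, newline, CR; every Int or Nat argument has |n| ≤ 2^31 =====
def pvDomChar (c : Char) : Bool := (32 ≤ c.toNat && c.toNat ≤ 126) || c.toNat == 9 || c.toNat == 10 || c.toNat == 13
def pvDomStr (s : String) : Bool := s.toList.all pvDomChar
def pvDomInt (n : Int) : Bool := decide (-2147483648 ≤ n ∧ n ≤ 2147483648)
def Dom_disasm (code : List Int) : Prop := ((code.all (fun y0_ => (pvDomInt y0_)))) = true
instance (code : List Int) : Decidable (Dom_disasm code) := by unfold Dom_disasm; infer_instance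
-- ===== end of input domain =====

-- B disassembles in two stages (decode to an IR, then format from one opcode table): alternative decomposition, same cost.
-- Shared helper for Python's f"{pc:02X}: " prefix (exact for pc ≥ 0, which is the only case reached).
def hexDigit (n : Nat) : Char := if n < 10 then Char.ofNat (48 + n) else Char.ofNat (55 + n)

def hexChars (n : Nat) : List Char :=
  if n < 16 then [hexDigit n]
  else hexChars (n / 16) ++ [hexDigit (n % 16)]
termination_by n
decreasing_by exact Nat.div_lt_self (by omega) (by omega)

def fmtPC (pc : Nat) : String := String.ofList ((if pc < 16 then ['0'] else []) ++ hexChars pc) ++ ": "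

-- ===== PORT A =====
-- while loop as fuel recursion (fuel = code.length suffices: pc grows by ≥ 1 per step).
-- operand reads code[pc+k]: Python raises IndexError out of range; Pre_disasm excludes that, so getD 0 is exact inside Pre_.
def disasmGoA (code : List Int) (fuel : Nat) (pc : Nat) : List String :=
  match fuel with
  | 0 => []
  | fuel + 1 =>
    if pc < code.length then
      let op := code.getD pc 0
      if op = 1 then
        (fmtPC pc ++ "LOAD_IMM R" ++ PySem.Int.toStr (code.getD (pc+1) 0) ++ ", " ++ PySem.Int.toStr (code.getD (pc+2) 0)) :: disasmGoA code fuel (pc+3)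
      else if op = 2 then
        (fmtPC pc ++ "LOAD_ADDR R" ++ PySem.Int.toStr (code.getD (pc+1) 0) ++ ", " ++ PySem.Int.toStr (code.getD (pc+2) 0) ++ ", R" ++ PySem.Int.toStr (code.getD (pc+3) 0)) :: disasmGoA code fuel (pc+4)
      else if op = 3 then
        (fmtPC pc ++ "STORE_ADDR " ++ PySem.Int.toStr (code.getD (pc+1) 0) ++ ", R" ++ PySem.Int.toStr (code.getD (pc+2) 0) ++ ", R" ++ PySem.Int.toStr (code.getD (pc+3) 0)) :: disasmGoA code fuel (pc+4)
      else if op = 4 then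
        (fmtPC pc ++ "ADD R" ++ PySem.Int.toStr (code.getD (pc+1) 0) ++ ", R" ++ PySem.Int.toStr (code.getD (pc+2) 0) ++ ", R" ++ PySem.Int.toStr (code.getD (pc+3) 0)) :: disasmGoA code fuel (pc+4)
      else if op = 5 then
        (fmtPC pc ++ "MOD R" ++ PySem.Int.toStr (code.getD (pc+1) 0) ++ ", " ++ PySem.Int.toStr (code.getD (pc+2) 0) ++ ", R" ++ PySem.Int.toStr (code.getD (pc+3) 0)) :: disasmGoA code fuel (pc+4)
      else if op = 6 then
        (fmtPC pc ++ "XOR R" ++ PySem.Int.toStr (code.getD (pc+1) 0) ++ ", R" ++ PySem.Int.toStr (code.getD (pc+2) 0) ++ ", R" ++ PySem.Int.toStr (code.getD (pc+3) 0)) :: disasmGoA code fuel (pc+4)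
      else if op = 7 then
        (fmtPC pc ++ "INC R" ++ PySem.Int.toStr (code.getD (pc+1) 0)) :: disasmGoA code fuel (pc+2)
      else if op = 8 then
        (fmtPC pc ++ "CMP R" ++ PySem.Int.toStr (code.getD (pc+1) 0) ++ ", " ++ PySem.Int.toStr (code.getD (pc+2) 0)) :: disasmGoA code fuel (pc+3)
      else if op = 9 then
        (fmtPC pc ++ "JMP " ++ PySem.Int.toStr (code.getD (pc+1) 0)) :: disasmGoA code fuel (pc+2)
      else if op = 10 then
        (fmtPC pc ++ "JNZ " ++ PySem.Int.toStr (code.getD (pc+1) 0)) :: disasmGoA code fuel (pc+2)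
      else if op = 11 then
        (fmtPC pc ++ "LOAD_IND R" ++ PySem.Int.toStr (code.getD (pc+1) 0) ++ ", R" ++ PySem.Int.toStr (code.getD (pc+2) 0)) :: disasmGoA code fuel (pc+3)
      else
        (fmtPC pc ++ "DB " ++ PySem.Int.toStr op) :: disasmGoA code fuel (pc+1)
    else []

def disasm (code : List Int) : List String := disasmGoA code code.length 0

-- ===== PORT B =====
-- INFO table: opcode -> (mnemonic, operand-mode string: 'R' = register, 'I' = immediate)
def pvINFO : PySem.Dict Int (String × List Char) := PySem.Dict.ofList
  [ (1,  ("LOAD_IMM",   ['R','I'])),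
    (2,  ("LOAD_ADDR",  ['R','I','R'])),
    (3,  ("STORE_ADDR", ['I','R','R'])),
    (4,  ("ADD",        ['R','R','R'])),
    (5,  ("MOD",        ['R','I','R'])),
    (6,  ("XOR",        ['R','R','R'])),
    (7,  ("INC",        ['R'])),
    (8,  ("CMP",        ['R','I'])),
    (9,  ("JMP",        ['I'])),
    (10, ("JNZ",        ['I'])),
    (11, ("LOAD_IND",   ['R','R'])) ]

-- _decode's while loop as fuel recursion; operand reads getD 0 are exact inside Pre_ (same as port A).
def decodeGo (code : List Int) (fuel : Nat) (pc : Nat) : List (Nat × Int × List Int) :=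
  match fuel with
  | 0 => []
  | fuel + 1 =>
    if pc < code.length then
      let op := code.getD pc 0
      let k := match PySem.Dict.get? pvINFO op with
               | some info => info.2.length
               | none => 0
      (pc, op, (List.range k).map (fun j => code.getD (pc+1+j) 0)) :: decodeGo code fuel (pc+1+k)
    else []

-- _fmt from Source B
def fmtLine (rec : Nat × Int × List Int) : String :=
  match PySem.Dict.get? pvINFO rec.2.1 with
  | some (name, modes) =>
      fmtPC rec.1 ++ name ++ " " ++
        PySem.Str.join ", " ((modes.zip rec.2.2).map (fun p => (if p.1 = 'R' then "R" else "") ++ PySem.Int.toStr p.2))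
  | none => fmtPC rec.1 ++ "DB " ++ PySem.Int.toStr rec.2.1

def disasm_alt (code : List Int) : List String := (decodeGo code code.length 0).map fmtLine

-- ===== PRECONDITION & SPEC =====
def oplen (op : Int) : Nat :=
  if op = 1 then 3
  else if op = 2 ∨ op = 3 ∨ op = 4 ∨ op = 5 ∨ op = 6 then 4
  else if op = 7 ∨ op = 9 ∨ op = 10 then 2
  else if op = 8 ∨ op = 11 then 3
  else 1

def wfGo : Nat → List Int → Bool
  | _, [] => true
  | 0, _ :: _ => false
  | fuel + 1, op :: rest => decide (oplen op - 1 ≤ rest.length) && wfGo fuel (rest.drop (oplen op - 1))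

-- fuel = code.length suffices: each instruction consumes at least its opcode byte
def wfCode (code : List Int) : Bool := wfGo code.length code

-- Pre_ excludes exactly the byte lists whose last instruction is truncated: there Python A and Python B both raise IndexError.
def Pre_disasm (code : List Int) : Prop := wfCode code = true
instance (code : List Int) : Decidable (Pre_disasm code) := by unfold Pre_disasm; infer_instance

def pvWitness_disasm : List Int := [1, 0, 5]

def Spec_disasm (code : List Int) (out : List String) : Prop := out = disasm_alt code
instance (code : List Int) (out : List String) : Decidable (Spec_disasm code out) := by unfold Spec_disasm; infer_instance

-- ===== CLAIM =====
def Claim_equal_disasm : Prop := ∀ (code : List Int), Dom_disasm code → Pre_disasm code → Spec_disasm code (disasm code)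

-- ===== LEMMAS AND PROOFS =====
def pvINFOItems : List (Int × (String × List Char)) :=
  [ (1,  ("LOAD_IMM",   ['R','I'])),
    (2,  ("LOAD_ADDR",  ['R','I','R'])),
    (3,  ("STORE_ADDR", ['I','R','R'])),
    (4,  ("ADD",        ['R','R','R'])),
    (5,  ("MOD",        ['R','I','R'])),
    (6,  ("XOR",        ['R','R','R'])),
    (7,  ("INC",        ['R'])),
    (8,  ("CMP",        ['R','I'])),
    (9,  ("JMP",        ['I'])),
    (10, ("JNZ",        ['I'])),
    (11, ("LOAD_IND",   ['R','R'])) ]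

theorem go_eq (code : List Int) (fuel : Nat) : ∀ pc, disasmGoA code fuel pc = (decodeGo code fuel pc).map fmtLine := by
  induction fuel with
  | zero => intro pc; rfl
  | succ fuel ih =>
    intro pc
    by_cases hpc : pc < code.length
    · simp only [disasmGoA, decodeGo, if_pos hpc]
      by_cases h1 : code[pc]?.getD 0 = 1
      · have hl : PySem.Dict.get? pvINFO 1 = some ("LOAD_IMM", ['R','I']) := by rfl
        simp [h1, hl, fmtLine, PySem.Str.join, PySem.Chars.join_cons_cons, PySem.Chars.join_singleton, List.range_succ, ih, ← String.toList_inj, String.toList_append]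
      by_cases h2 : code[pc]?.getD 0 = 2
      · have hl : PySem.Dict.get? pvINFO 2 = some ("LOAD_ADDR", ['R','I','R']) := by rfl
        simp [h2, hl, fmtLine, PySem.Str.join, PySem.Chars.join_cons_cons, PySem.Chars.join_singleton, List.range_succ, ih, ← String.toList_inj, String.toList_append]
      by_cases h3 : code[pc]?.getD 0 = 3
      · have hl : PySem.Dict.get? pvINFO 3 = some ("STORE_ADDR", ['I','R','R']) := by rfl
        simp [h3, hl, fmtLine, PySem.Str.join, PySem.Chars.join_cons_cons, PySem.Chars.join_singleton, List.range_succ, ih, ← String.toList_inj, String.toList_append]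
      by_cases h4 : code[pc]?.getD 0 = 4
      · have hl : PySem.Dict.get? pvINFO 4 = some ("ADD", ['R','R','R']) := by rfl
        simp [h4, hl, fmtLine, PySem.Str.join, PySem.Chars.join_cons_cons, PySem.Chars.join_singleton, List.range_succ, ih, ← String.toList_inj, String.toList_append]
      by_cases h5 : code[pc]?.getD 0 = 5
      · have hl : PySem.Dict.get? pvINFO 5 = some ("MOD", ['R','I','R']) := by rfl
        simp [h5, hl, fmtLine, PySem.Str.join, PySem.Chars.join_cons_cons, PySem.Chars.join_singleton, List.range_succ, ih, ← String.toList_inj, String.toList_append]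
      by_cases h6 : code[pc]?.getD 0 = 6
      · have hl : PySem.Dict.get? pvINFO 6 = some ("XOR", ['R','R','R']) := by rfl
        simp [h6, hl, fmtLine, PySem.Str.join, PySem.Chars.join_cons_cons, PySem.Chars.join_singleton, List.range_succ, ih, ← String.toList_inj, String.toList_append]
      by_cases h7 : code[pc]?.getD 0 = 7
      · have hl : PySem.Dict.get? pvINFO 7 = some ("INC", ['R']) := by rfl
        simp [h7, hl, fmtLine, PySem.Str.join, PySem.Chars.join_singleton, List.range_succ, ih, ← String.toList_inj, String.toList_append]
      by_cases h8 : code[pc]?.getD 0 = 8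
      · have hl : PySem.Dict.get? pvINFO 8 = some ("CMP", ['R','I']) := by rfl
        simp [h8, hl, fmtLine, PySem.Str.join, PySem.Chars.join_cons_cons, PySem.Chars.join_singleton, List.range_succ, ih, ← String.toList_inj, String.toList_append]
      by_cases h9 : code[pc]?.getD 0 = 9
      · have hl : PySem.Dict.get? pvINFO 9 = some ("JMP", ['I']) := by rfl
        simp [h9, hl, fmtLine, PySem.Str.join, PySem.Chars.join_singleton, List.range_succ, ih, ← String.toList_inj, String.toList_append]
      by_cases h10 : code[pc]?.getD 0 = 10
      · have hl : PySem.Dict.get? pvINFO 10 = some ("JNZ", ['I']) := by rfl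
        simp [h10, hl, fmtLine, PySem.Str.join, PySem.Chars.join_singleton, List.range_succ, ih, ← String.toList_inj, String.toList_append]
      by_cases h11 : code[pc]?.getD 0 = 11
      · have hl : PySem.Dict.get? pvINFO 11 = some ("LOAD_IND", ['R','R']) := by rfl
        simp [h11, hl, fmtLine, PySem.Str.join, PySem.Chars.join_cons_cons, PySem.Chars.join_singleton, List.range_succ, ih, ← String.toList_inj, String.toList_append]
      have hnone : PySem.Dict.get? pvINFO (code[pc]?.getD 0) = none := by
        have hi : pvINFO.items = pvINFOItems := by rfl
        simp [PySem.Dict.get?, hi, pvINFOItems, List.find?, beq_eq_false_iff_ne.mpr (fun h => h1 h.symm), beq_eq_false_iff_ne.mpr (fun h => h2 h.symm), beq_eq_false_iff_ne.mpr (fun h => h3 h.symm), beq_eq_false_iff_ne.mpr (fun h => h4 h.symm), beq_eq_false_iff_ne.mpr (fun h => h5 h.symm), beq_eq_false_iff_ne.mpr (fun h => h6 h.symm), beq_eq_false_iff_ne.mpr (fun h => h7 h.symm), beq_eq_false_iff_ne.mpr (fun h => h8 h.symm), beq_eq_false_iff_ne.mpr (fun h => h9 h.symm), beq_eq_false_iff_ne.mpr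 (fun h => h10 h.symm), beq_eq_false_iff_ne.mpr (fun h => h11 h.symm)]
      simp [h1, h2, h3, h4, h5, h6, h7, h8, h9, h10, h11, hnone, fmtLine, ih]
    · simp [disasmGoA, decodeGo, hpc]

-- ===== VERDICT =====
theorem disasm_spec : Claim_equal_disasm := by
  intro code _ _
  unfold Spec_disasm disasm disasm_alt
  exact go_eq code code.length 0
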